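-- pv_equiv track=rewrite | github.com/ecw74/advent-of-code | 2023/day-07/part-1.py | categorize_hands
-- ===== SOURCE A (Python) =====
-- from collections import Counter
--
-- def categorize_hands(card_hands):
--     """
--     Categorize a list of card hands into different types.
--
--     Args:
--     card_hands (list): A list of strings where each string represents a hand of cards.
--
--     Returns:
--     dict: A dictionary categorizing each hand into one of the seven types.
--
--     Example:
--     >>> categorize_hands(["33KT2", "555JT", "KK776", "JJTTK", "QQQAJ"])
--     {'Five of a Kind': [], 'Four of a Kind': [], 'Full House': [], 'Three of a Kind': ['555JT', 'QQQAJ'], 'Two Pair': ['KK776', 'JJTTK'], 'One Pair': ['33KT2'], 'High Card': []}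
--     """
--     categories = {
--         "Five of a Kind": [],
--         "Four of a Kind": [],
--         "Full House": [],
--         "Three of a Kind": [],
--         "Two Pair": [],
--         "One Pair": [],
--         "High Card": []
--     }
--
--     for hand in card_hands:
--         counts = Counter(hand)
--         count_values = list(counts.values())
--
--         if 5 in count_values:
--             categories["Five of a Kind"].append(hand)
--         elif 4 in count_values:
--             categories["Four of a Kind"].append(hand)
--         elif sorted(count_values) == [2, 3]:
--             categories["Full House"].append(hand)
--         elif 3 in count_values:
--             categories["Three of a Kind"].append(hand)
--         elif count_values.count(2) == 2:
--             categories["Two Pair"].append(hand)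
--         elif 2 in count_values:
--             categories["One Pair"].append(hand)
--         else:
--             categories["High Card"].append(hand)
--
--     return categories
-- ===== SOURCE B (Python) =====
-- from collections import Counter
--
-- _NAMES = ("Five of a Kind", "Four of a Kind", "Full House", "Three of a Kind",
--           "Two Pair", "One Pair", "High Card")
--
--
-- def _classify(hand):
--     counts = Counter(hand)
--     freq = Counter(counts.values())
--     if freq[5]:
--         return "Five of a Kind"
--     if freq[4]:
--         return "Four of a Kind"
--     if freq[3]:
--         if freq[3] == 1 and freq[2] == 1 and len(counts) == 2:
--             return "Full House"
--         return "Three of a Kind"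
--     if freq[2] == 2:
--         return "Two Pair"
--     if freq[2]:
--         return "One Pair"
--     return "High Card"
--
--
-- def categorize_hands(card_hands):
--     labels = [_classify(h) for h in card_hands]
--     return {name: [h for h, lab in zip(card_hands, labels) if lab == name]
--             for name in _NAMES}
-- ===== Notes on version B (the rewrite author's own statement) =====
-- stated objective: alternative
-- what changed: B replaces A's single loop of membership/sort tests with a per-hand classifier over a count-of-counts signature (Counter of Counter values, no sorting) and builds the seven category lists by grouping comprehensions over the labeled hands.
import Mathlib
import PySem

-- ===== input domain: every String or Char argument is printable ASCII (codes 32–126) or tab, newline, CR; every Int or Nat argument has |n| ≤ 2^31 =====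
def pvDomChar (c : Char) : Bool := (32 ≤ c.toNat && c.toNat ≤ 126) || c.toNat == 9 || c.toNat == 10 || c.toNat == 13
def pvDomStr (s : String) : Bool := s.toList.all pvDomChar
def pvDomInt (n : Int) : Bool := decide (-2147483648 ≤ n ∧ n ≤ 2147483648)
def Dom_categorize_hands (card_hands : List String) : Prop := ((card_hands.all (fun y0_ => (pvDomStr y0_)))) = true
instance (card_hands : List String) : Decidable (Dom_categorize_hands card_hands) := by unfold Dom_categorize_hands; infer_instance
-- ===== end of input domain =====

-- B classifies each hand from a count-of-counts signature (no sorting) and groups hands per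
-- category by comprehension, instead of A's single append loop of membership/sort tests.

-- ===== PORT A =====
-- one loop step of A: Counter(hand), then the if/elif chain appending hand to one category
-- (categories[k].append(hand) on an always-present key k = modify k with default []).
def pvAStep (categories : PySem.Dict String (List String)) (hand : String) :
    PySem.Dict String (List String) :=
  let counts := PySem.Dict.counter hand.toList
  let count_values := counts.values
  if (5 : Int) ∈ count_values then categories.modify "Five of a Kind" [] (· ++ [hand])
  else if (4 : Int) ∈ count_values then categories.modify "Four of a Kind" [] (· ++ [hand])
  else if PySem.List.sorted count_values (fun x => x) false = [2, 3] then
    categories.modify "Full House" [] (· ++ [hand])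
  else if (3 : Int) ∈ count_values then categories.modify "Three of a Kind" [] (· ++ [hand])
  else if count_values.count (2 : Int) = 2 then categories.modify "Two Pair" [] (· ++ [hand])
  else if (2 : Int) ∈ count_values then categories.modify "One Pair" [] (· ++ [hand])
  else categories.modify "High Card" [] (· ++ [hand])

def categorize_hands (card_hands : List String) : List (String × List String) :=
  (card_hands.foldl pvAStep
    (PySem.Dict.ofList [("Five of a Kind", []), ("Four of a Kind", []), ("Full House", []),
      ("Three of a Kind", []), ("Two Pair", []), ("One Pair", []), ("High Card", [])])).items

-- ===== PORT B =====
def pvNames : List String :=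
  ["Five of a Kind", "Four of a Kind", "Full House", "Three of a Kind",
   "Two Pair", "One Pair", "High Card"]

def pvClassify (hand : String) : String :=
  let counts := PySem.Dict.counter hand.toList
  let freq := PySem.Dict.counter counts.values
  if freq.getD 5 0 ≠ 0 then "Five of a Kind"
  else if freq.getD 4 0 ≠ 0 then "Four of a Kind"
  else if freq.getD 3 0 ≠ 0 then
    if freq.getD 3 0 = 1 ∧ freq.getD 2 0 = 1 ∧ counts.size = 2 then "Full House"
    else "Three of a Kind"
  else if freq.getD 2 0 = 2 then "Two Pair"
  else if freq.getD 2 0 ≠ 0 then "One Pair"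
  else "High Card"

def categorize_hands_alt (card_hands : List String) : List (String × List String) :=
  let labels := card_hands.map pvClassify
  pvNames.map (fun name =>
    (name, ((card_hands.zip labels).filter (fun p => p.2 == name)).map (·.1)))

-- ===== PRECONDITION & SPEC =====
def Spec_categorize_hands (card_hands : List String) (out : List (String × List String)) : Prop := out = categorize_hands_alt card_hands
instance (card_hands : List String) (out : List (String × List String)) : Decidable (Spec_categorize_hands card_hands out) := by unfold Spec_categorize_hands; infer_instance

-- ===== CLAIM (what is proved, stated in full; the proofs are below) =====
def Claim_equal_categorize_hands : Prop := ∀ (card_hands : List String), Dom_categorize_hands card_hands → Spec_categorize_hands card_hands (categorize_hands card_hands)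

-- ===== LEMMAS AND PROOFS =====

-- group of hands labeled `name` (the body of B's comprehension)
def pvGroup (name : String) (hands : List String) : List String :=
  ((hands.zip (hands.map pvClassify)).filter (fun p => p.2 == name)).map (·.1)

lemma pvGroup_cons (name : String) (h : String) (t : List String) :
    pvGroup name (h :: t) =
      if pvClassify h == name then h :: pvGroup name t else pvGroup name t := by
  simp only [pvGroup, List.map_cons, List.zip_cons_cons, List.filter_cons]
  split <;> simp

-- sorted(count_values) == [2, 3] characterised by counts and length
lemma pvSorted23 (cv : List Int) :
    PySem.List.sorted cv (fun x => x) false = [2, 3] ↔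
      cv.count 2 = 1 ∧ cv.count 3 = 1 ∧ cv.length = 2 := by
  constructor
  · intro h
    have hp : cv.Perm [2, 3] := by
      have := PySem.List.sorted_perm cv (fun x => x) false
      rw [h] at this; exact this.symm
    refine ⟨?_, ?_, ?_⟩
    · rw [hp.count_eq]; decide
    · rw [hp.count_eq]; decide
    · rw [hp.length_eq]; rfl
  · rintro ⟨h2, h3, hl⟩
    apply PySem.List.sorted_eq_of_perm_of_pairwise_lt
    · match cv, hl with
      | [a, b], _ =>
        simp only [List.count_cons, List.count_nil] at h2 h3
        by_cases ha2 : a = 2 <;> by_cases hb2 : b = 2 <;>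
          by_cases ha3 : a = 3 <;> by_cases hb3 : b = 3 <;>
          simp_all
        · exact List.Perm.swap 3 2 []
    · decide

-- membership via counts
lemma pvMemCount (cv : List Int) (k : Int) : k ∈ cv ↔ ¬ ((cv.count k : Int) = 0) := by
  rw [← List.count_pos_iff]
  omega

-- A's loop step appends the hand to the category B's classifier names
lemma pvStep_eq (d : PySem.Dict String (List String)) (h : String) :
    pvAStep d h = d.modify (pvClassify h) [] (· ++ [h]) := by
  unfold pvAStep pvClassify
  simp only [PySem.Dict.getD_counter]
  set cv := (PySem.Dict.counter h.toList).values with hcv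
  have hsize : (PySem.Dict.counter h.toList).size = cv.length := by
    simp [PySem.Dict.size, PySem.Dict.values, hcv]
  rw [hsize]
  simp only [pvMemCount, pvSorted23]
  split_ifs <;> first | rfl | omega

@[simp] lemma pvMod0 (a b c d e f g : List String) (x : String) :
    (PySem.Dict.mk [("Five of a Kind", a), ("Four of a Kind", b), ("Full House", c), ("Three of a Kind", d), ("Two Pair", e), ("One Pair", f), ("High Card", g)]).modify "Five of a Kind" [] (· ++ [x]) =
    PySem.Dict.mk [("Five of a Kind", a ++ [x]), ("Four of a Kind", b), ("Full House", c), ("Three of a Kind", d), ("Two Pair", e), ("One Pair", f), ("High Card", g)] := by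
  simp [PySem.Dict.modify, PySem.Dict.insert, PySem.Dict.getD, PySem.Dict.get?]

@[simp] lemma pvMod1 (a b c d e f g : List String) (x : String) :
    (PySem.Dict.mk [("Five of a Kind", a), ("Four of a Kind", b), ("Full House", c), ("Three of a Kind", d), ("Two Pair", e), ("One Pair", f), ("High Card", g)]).modify "Four of a Kind" [] (· ++ [x]) =
    PySem.Dict.mk [("Five of a Kind", a), ("Four of a Kind", b ++ [x]), ("Full House", c), ("Three of a Kind", d), ("Two Pair", e), ("One Pair", f), ("High Card", g)] := by
  simp [PySem.Dict.modify, PySem.Dict.insert, PySem.Dict.getD, PySem.Dict.get?]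

@[simp] lemma pvMod2 (a b c d e f g : List String) (x : String) :
    (PySem.Dict.mk [("Five of a Kind", a), ("Four of a Kind", b), ("Full House", c), ("Three of a Kind", d), ("Two Pair", e), ("One Pair", f), ("High Card", g)]).modify "Full House" [] (· ++ [x]) =
    PySem.Dict.mk [("Five of a Kind", a), ("Four of a Kind", b), ("Full House", c ++ [x]), ("Three of a Kind", d), ("Two Pair", e), ("One Pair", f), ("High Card", g)] := by
  simp [PySem.Dict.modify, PySem.Dict.insert, PySem.Dict.getD, PySem.Dict.get?]

@[simp] lemma pvMod3 (a b c d e f g : List String) (x : String) :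
    (PySem.Dict.mk [("Five of a Kind", a), ("Four of a Kind", b), ("Full House", c), ("Three of a Kind", d), ("Two Pair", e), ("One Pair", f), ("High Card", g)]).modify "Three of a Kind" [] (· ++ [x]) =
    PySem.Dict.mk [("Five of a Kind", a), ("Four of a Kind", b), ("Full House", c), ("Three of a Kind", d ++ [x]), ("Two Pair", e), ("One Pair", f), ("High Card", g)] := by
  simp [PySem.Dict.modify, PySem.Dict.insert, PySem.Dict.getD, PySem.Dict.get?]

@[simp] lemma pvMod4 (a b c d e f g : List String) (x : String) :
    (PySem.Dict.mk [("Five of a Kind", a), ("Four of a Kind", b), ("Full House", c), ("Three of a Kind", d), ("Two Pair", e), ("One Pair", f), ("High Card", g)]).modify "Two Pair" [] (· ++ [x]) =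
    PySem.Dict.mk [("Five of a Kind", a), ("Four of a Kind", b), ("Full House", c), ("Three of a Kind", d), ("Two Pair", e ++ [x]), ("One Pair", f), ("High Card", g)] := by
  simp [PySem.Dict.modify, PySem.Dict.insert, PySem.Dict.getD, PySem.Dict.get?]

@[simp] lemma pvMod5 (a b c d e f g : List String) (x : String) :
    (PySem.Dict.mk [("Five of a Kind", a), ("Four of a Kind", b), ("Full House", c), ("Three of a Kind", d), ("Two Pair", e), ("One Pair", f), ("High Card", g)]).modify "One Pair" [] (· ++ [x]) =
    PySem.Dict.mk [("Five of a Kind", a), ("Four of a Kind", b), ("Full House", c), ("Three of a Kind", d), ("Two Pair", e), ("One Pair", f ++ [x]), ("High Card", g)] := by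
  simp [PySem.Dict.modify, PySem.Dict.insert, PySem.Dict.getD, PySem.Dict.get?]

@[simp] lemma pvMod6 (a b c d e f g : List String) (x : String) :
    (PySem.Dict.mk [("Five of a Kind", a), ("Four of a Kind", b), ("Full House", c), ("Three of a Kind", d), ("Two Pair", e), ("One Pair", f), ("High Card", g)]).modify "High Card" [] (· ++ [x]) =
    PySem.Dict.mk [("Five of a Kind", a), ("Four of a Kind", b), ("Full House", c), ("Three of a Kind", d), ("Two Pair", e), ("One Pair", f), ("High Card", g ++ [x])] := by
  simp [PySem.Dict.modify, PySem.Dict.insert, PySem.Dict.getD, PySem.Dict.get?]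
-- the fold over B's per-hand step, with the seven accumulators generalized, is the grouping
lemma pvFold_eq (hands : List String) :
    ∀ (a b c d e f g : List String),
      (hands.foldl (fun d h => d.modify (pvClassify h) [] (· ++ [h]))
        (PySem.Dict.mk [("Five of a Kind", a), ("Four of a Kind", b), ("Full House", c),
          ("Three of a Kind", d), ("Two Pair", e), ("One Pair", f), ("High Card", g)])) =
      PySem.Dict.mk [("Five of a Kind", a ++ pvGroup "Five of a Kind" hands),
        ("Four of a Kind", b ++ pvGroup "Four of a Kind" hands),
        ("Full House", c ++ pvGroup "Full House" hands),
        ("Three of a Kind", d ++ pvGroup "Three of a Kind" hands),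
        ("Two Pair", e ++ pvGroup "Two Pair" hands),
        ("One Pair", f ++ pvGroup "One Pair" hands),
        ("High Card", g ++ pvGroup "High Card" hands)] := by
  induction hands with
  | nil => intro a b c d e f g; simp [pvGroup]
  | cons h t ih =>
    intro a b c d e f g
    have hcls : pvClassify h = "Five of a Kind" ∨ pvClassify h = "Four of a Kind" ∨
        pvClassify h = "Full House" ∨ pvClassify h = "Three of a Kind" ∨
        pvClassify h = "Two Pair" ∨ pvClassify h = "One Pair" ∨
        pvClassify h = "High Card" := by
      unfold pvClassify; dsimp only; split_ifs <;> simp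
    simp only [List.foldl_cons]
    rcases hcls with hc | hc | hc | hc | hc | hc | hc <;>
      rw [hc] <;>
      simp only [pvMod0, pvMod1, pvMod2, pvMod3, pvMod4, pvMod5, pvMod6] <;>
      rw [ih] <;>
      simp [pvGroup_cons, hc]

-- ===== VERDICT (by name: the statement is the Claim_ definition above) =====
theorem categorize_hands_spec : Claim_equal_categorize_hands := by
  intro card_hands _
  unfold Spec_categorize_hands categorize_hands categorize_hands_alt
  have hstep : pvAStep = fun d h => d.modify (pvClassify h) [] (· ++ [h]) :=
    funext fun d => funext fun h => pvStep_eq d h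
  rw [hstep]
  have hinit : PySem.Dict.ofList
      [("Five of a Kind", ([] : List String)), ("Four of a Kind", []), ("Full House", []),
       ("Three of a Kind", []), ("Two Pair", []), ("One Pair", []), ("High Card", [])] =
      PySem.Dict.mk [("Five of a Kind", []), ("Four of a Kind", []), ("Full House", []),
       ("Three of a Kind", []), ("Two Pair", []), ("One Pair", []), ("High Card", [])] := by
    rfl
  rw [hinit, pvFold_eq]
  simp [pvNames, pvGroup]
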